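-- pv_equiv track=rewrite | github.com/sarxhlwalker/Amino-Acid-Project | main.py | cut_list
-- ===== SOURCE A (Python) =====
-- def cut_list(new_array: list) -> list:
--     """
--     Return a new list from the values of new_array such that the new list contains no repetitions.
--     """
--     print_list = []
--     keys = []
--     for x in new_array:
--         index = x.find(',')
--         if x[0:index] not in keys:
--             print_list.append(x)
--             keys.append(x[0:index])
--         else:
--             val = keys.index(x[0:index])
--             if x[index + 1:] not in print_list[val]:
--                 print_list[val] = print_list[val] + x[index:]
--     return print_list
-- ===== SOURCE B (Python) =====
-- def cut_list(new_array: list) -> list: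
--     """
--     Repeated-partition re-implementation: decorate each entry with its key
--     (prefix before the first comma) once, then repeatedly take the head entry
--     and sweep the remaining list, folding same-key entries into the head and
--     keeping the others for the next round.
--     """
--     result = []
--     pending = [(x[:x.find(',')], x) for x in new_array]
--     while pending:
--         k, x = pending[0]
--         merged = x
--         nxt = []
--         for p in pending[1:]:
--             if p[0] == k:
--                 y = p[1]
--                 j = y.find(',')
--                 if y[j + 1:] not in merged:
--                     merged = merged + y[j:]
--             else:
--                 nxt.append(p)
--         pending = nxt
--         result.append(merged)
--     return result
-- ===== Notes on version B (the rewrite author's own statement) =====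
-- stated objective: alternative
-- what changed: A's single pass maintaining parallel print_list/keys lists with per-element linear membership and keys.index scans is replaced by repeated partitioning: entries are decorated with their key once, then each round takes the head entry and sweeps the remaining list, folding same-key entries into the head and keeping the others for the next round.
import Mathlib
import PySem

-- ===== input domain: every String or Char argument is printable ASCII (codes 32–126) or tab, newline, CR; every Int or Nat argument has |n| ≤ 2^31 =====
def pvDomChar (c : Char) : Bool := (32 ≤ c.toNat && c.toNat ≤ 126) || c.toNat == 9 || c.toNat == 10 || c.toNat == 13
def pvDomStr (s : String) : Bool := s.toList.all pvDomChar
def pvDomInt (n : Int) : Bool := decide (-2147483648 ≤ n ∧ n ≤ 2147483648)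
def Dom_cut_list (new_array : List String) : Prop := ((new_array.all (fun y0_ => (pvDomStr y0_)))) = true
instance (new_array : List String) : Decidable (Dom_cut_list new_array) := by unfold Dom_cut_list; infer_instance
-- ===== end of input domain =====

-- B replaces A's single pass over parallel print_list/keys lists (inline 'in keys' /
-- keys.index scans, merging in place) by repeated partitioning of the remaining list by
-- the head's key (alternative decomposition, similar cost).
-- Strings are handled as char lists via PySem.Chars/PySem.List (exact for Python str on this domain).

-- ===== PORT A =====
-- one step of A's loop over new_array; state = (print_list, keys)
def cutStepA (st : List (List Char) × List (List Char)) (x : List Char) :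
    List (List Char) × List (List Char) :=
  let index := PySem.Chars.find x [',']
  let key := PySem.List.slice x (some 0) (some index)
  if key ∈ st.2 then
    -- else-branch of A: val = keys.index(key); merge into print_list[val]
    match PySem.List.index? st.2 key with
    | some val =>
      match st.1[val]? with
      | some pv =>
        if PySem.Chars.isIn (PySem.List.slice x (some (index + 1)) none) pv then st
        else (st.1.set val (pv ++ PySem.List.slice x (some index) none), st.2)
      | none => st  -- unreachable: val is a valid index (Python would raise otherwise)
    | none => st    -- unreachable: key ∈ keys guarantees index() succeeds
  else
    (st.1 ++ [x], st.2 ++ [key])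

def cut_list (new_array : List String) : List String :=
  (((new_array.map String.toList).foldl cutStepA ([], [])).1).map String.ofList

-- ===== PORT B =====
-- the key both programs compute for an entry: x[:x.find(',')]
def keyOf (x : List Char) : List Char :=
  PySem.List.slice x (some 0) (some (PySem.Chars.find x [',']))

-- one step of B's inner merge: j = y.find(','); if y[j+1:] not in merged: …
def mergeStep (m : List Char) (y : List Char) : List Char :=
  let j := PySem.Chars.find y [',']
  if PySem.Chars.isIn (PySem.List.slice y (some (j + 1)) none) m then m
  else m ++ PySem.List.slice y (some j) none

-- one step of B's sweep over pending[1:]: state = (merged, nxt)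
def altStep (k : List Char) (st : List Char × List (List Char × List Char))
    (p : List Char × List Char) : List Char × List (List Char × List Char) :=
  if p.1 == k then (mergeStep st.1 p.2, st.2) else (st.1, st.2 ++ [p])

-- the sweep keeps at most as many entries as it reads (termination of the while loop)
lemma altStep_fold_len (k : List Char) (rest : List (List Char × List Char)) :
    ∀ (m : List Char) (acc : List (List Char × List Char)),
    ((rest.foldl (altStep k) (m, acc)).2).length ≤ acc.length + rest.length := by
  induction rest with
  | nil => intro m acc; simp
  | cons p t ih =>
      intro m acc
      simp only [List.foldl_cons, altStep]
      split_ifs with h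
      · exact le_trans (ih _ acc) (by simp only [List.length_cons]; omega)
      · exact le_trans (ih _ (acc ++ [p])) (by simp only [List.length_append, List.length_cons, List.length_nil]; omega)

-- B's while loop: state = (pending, result)
def altGo (pending : List (List Char × List Char)) (result : List (List Char)) :
    List (List Char) :=
  match pending with
  | [] => result
  | (k, x) :: rest =>
    let st := rest.foldl (altStep k) (x, [])
    altGo st.2 (result ++ [st.1])
termination_by pending.length
decreasing_by
  simp only [List.length_cons]
  exact Nat.lt_succ_of_le (by simpa using altStep_fold_len k rest x [])

def cut_list_alt (new_array : List String) : List String :=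
  (altGo ((new_array.map String.toList).map (fun x => (keyOf x, x))) []).map String.ofList

-- ===== PRECONDITION & SPEC =====
def Spec_cut_list (new_array : List String) (out : List String) : Prop := out = cut_list_alt new_array
instance (new_array : List String) (out : List String) : Decidable (Spec_cut_list new_array out) := by unfold Spec_cut_list; infer_instance

-- ===== CLAIM (what is proved, stated in full; the proofs are below) =====
def Claim_equal_cut_list : Prop := ∀ (new_array : List String), Dom_cut_list new_array → Spec_cut_list new_array (cut_list new_array)

-- ===== LEMMAS AND PROOFS =====

-- abstract grouping: ordered association list key ↦ entries, first match extended in place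
def gadd : List (List Char × List (List Char)) → List Char → List (List Char × List (List Char))
  | [], x => [(keyOf x, [x])]
  | (k, v) :: t, x => if k = keyOf x then (k, v ++ [x]) :: t else (k, v) :: gadd t x

def mergeGroup (g : List (List Char)) : List Char :=
  match g with
  | [] => []      -- unreachable: every group holds at least its first entry
  | h :: t => t.foldl mergeStep h

def gInv (g : List (List Char × List (List Char))) : Prop :=
  (g.map Prod.fst).Nodup ∧ ∀ p ∈ g, p.2 ≠ []

lemma gadd_fst (g : List (List Char × List (List Char))) (x : List Char) :
    (gadd g x).map Prod.fst
      = if keyOf x ∈ g.map Prod.fst then g.map Prod.fst else g.map Prod.fst ++ [keyOf x] := by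
  induction g with
  | nil => simp [gadd]
  | cons p t ih =>
      obtain ⟨k, v⟩ := p
      by_cases hk : k = keyOf x
      · simp [gadd, hk]
      · simp only [gadd, if_neg hk, List.map_cons, ih, List.mem_cons]
        split_ifs with h1 h2 h3 <;> simp_all [Ne.symm hk]

lemma gadd_inv (g : List (List Char × List (List Char))) (x : List Char)
    (h : gInv g) : gInv (gadd g x) := by
  obtain ⟨hn, hv⟩ := h
  refine ⟨?_, ?_⟩
  · rw [gadd_fst]
    split_ifs with hm
    · exact hn
    · simpa using List.Nodup.concat hm hn
  · induction g with
    | nil => simp [gadd]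
    | cons p t ih =>
        obtain ⟨k, v⟩ := p
        by_cases hk : k = keyOf x
        · intro q hq
          rcases (by simpa [gadd, hk] using hq : q = (k, v ++ [x]) ∨ q ∈ t) with h1 | h2
          · simp [h1]
          · exact hv q (by simp [h2])
        · intro q hq
          rcases (by simpa [gadd, hk] using hq : q = (k, v) ∨ q ∈ gadd t x) with h1 | h2
          · exact hv q (by simp [h1])
          · exact ih (by simpa using hn.sublist (List.sublist_cons_self _ _))
              (fun r hr => hv r (by simp [hr])) q h2

lemma cutStepA_cons_ne (x a k0 : List Char) (pl keys : List (List Char))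
    (hk : k0 ≠ keyOf x) :
    cutStepA (a :: pl, k0 :: keys) x
      = (a :: (cutStepA (pl, keys) x).1, k0 :: (cutStepA (pl, keys) x).2) := by
  have hb : (k0 == keyOf x) = false := by simpa using hk
  simp only [cutStepA, PySem.List.index?,
    show PySem.List.slice x (some 0) (some (PySem.Chars.find x [','])) = keyOf x from rfl]
  by_cases hm : keyOf x ∈ keys
  · rcases Option.isSome_iff_exists.mp (List.isSome_idxOf?.mpr hm) with ⟨n, hn⟩
    simp only [List.mem_cons, hm, or_true, if_true, List.idxOf?_cons, hb, Bool.false_eq_true,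
      if_false, hn, Option.map_some]
    cases hpn : pl[n]? with
    | none => simp [hpn]
    | some pv =>
        simp only [List.getElem?_cons_succ, hpn]
        split_ifs <;> simp [List.set_cons_succ]
  · have hm' : keyOf x ∉ k0 :: keys := by simp [Ne.symm hk, hm]
    simp [hm, hm']

lemma mergeGroup_append (v : List (List Char)) (x : List Char) (hv : v ≠ []) :
    mergeGroup (v ++ [x]) = mergeStep (mergeGroup v) x := by
  cases v with
  | nil => exact absurd rfl hv
  | cons h0 tv => simp [mergeGroup, List.foldl_append]

lemma stepA_eq (g : List (List Char × List (List Char))) (x : List Char)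
    (h : ∀ p ∈ g, p.2 ≠ []) :
    cutStepA (g.map (fun p => mergeGroup p.2), g.map Prod.fst) x
      = ((gadd g x).map (fun p => mergeGroup p.2), (gadd g x).map Prod.fst) := by
  induction g with
  | nil => simp [cutStepA, gadd, mergeGroup, keyOf]
  | cons p t ih =>
      obtain ⟨k, v⟩ := p
      by_cases hk : k = keyOf x
      · have hv : v ≠ [] := h (k, v) (by simp)
        simp only [List.map_cons, cutStepA, PySem.List.index?, gadd, ← hk,
          show PySem.List.slice x (some 0) (some (PySem.Chars.find x [','])) = keyOf x from rfl,
          List.mem_cons, List.idxOf?_cons, beq_self_eq_true, true_or,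
          List.getElem?_cons_zero, List.set_cons_zero, if_pos, mergeGroup_append v x hv]
        simp [mergeStep]
        split_ifs <;> simp
      · rw [List.map_cons, List.map_cons, cutStepA_cons_ne x (mergeGroup v) k _ _ hk,
          ih (fun p hp => h p (by simp [hp]))]
        simp [gadd, hk]

-- A's fold computes the grouped view: print_list = merged groups, keys = group keys
lemma foldl_A (l : List (List Char)) (g : List (List Char × List (List Char)))
    (h : gInv g) :
    l.foldl cutStepA (g.map (fun p => mergeGroup p.2), g.map Prod.fst)
      = ((l.foldl gadd g).map (fun p => mergeGroup p.2), (l.foldl gadd g).map Prod.fst) := by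
  induction l generalizing g with
  | nil => rfl
  | cons x t ih =>
      simp only [List.foldl_cons, stepA_eq g x h.2]
      exact ih (gadd g x) (gadd_inv g x h)

-- splitting lemma for gadd: a fold starting at (k,v)::g puts every key-k entry into v
-- and lets the others act on g
lemma foldl_gadd_split (l : List (List Char)) :
    ∀ (k : List Char) (v : List (List Char)) (g : List (List Char × List (List Char))),
    l.foldl gadd ((k, v) :: g)
      = (k, v ++ l.filter (fun y => keyOf y == k))
          :: (l.filter (fun y => !(keyOf y == k))).foldl gadd g := by
  induction l with
  | nil => intro k v g; simp
  | cons y t ih =>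
      intro k v g
      by_cases hy : keyOf y = k
      · have h1 : gadd ((k, v) :: g) y = (k, v ++ [y]) :: g := by simp [gadd, hy]
        simp [List.foldl_cons, h1, ih k (v ++ [y]) g, hy]
      · have h1 : gadd ((k, v) :: g) y = (k, v) :: gadd g y := by
          simp [gadd, Ne.symm hy]
        simp [List.foldl_cons, h1, ih k v (gadd g y), hy]

-- the fused sweep is a merge-fold over the matching entries plus a filter of the rest
lemma altStep_fold_eq (k : List Char) (rest : List (List Char × List Char)) :
    ∀ (m : List Char) (acc : List (List Char × List Char)),
    rest.foldl (altStep k) (m, acc)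
      = ((rest.filter (fun p => p.1 == k)).foldl (fun m p => mergeStep m p.2) m,
         acc ++ rest.filter (fun p => !(p.1 == k))) := by
  induction rest with
  | nil => intro m acc; simp
  | cons p t ih =>
      intro m acc
      by_cases h : p.1 = k
      · simp [List.foldl_cons, altStep, h, ih]
      · simp [List.foldl_cons, altStep, h, ih (m := m) (acc := acc ++ [p])]

-- B's loop computes the same grouped view (strong induction on the pending length)
lemma altGo_eq (n : Nat) : ∀ (l : List (List Char)), l.length ≤ n → ∀ (res : List (List Char)),
    altGo (l.map (fun x => (keyOf x, x))) res
      = res ++ (l.foldl gadd []).map (fun p => mergeGroup p.2) := by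
  induction n with
  | zero =>
      intro l hl res
      have : l = [] := List.length_eq_zero_iff.mp (Nat.le_zero.mp hl)
      simp [this, altGo]
  | succ n ih =>
      intro l hl res
      cases l with
      | nil => simp [altGo]
      | cons x rest =>
          rw [List.map_cons, altGo,
            altStep_fold_eq (keyOf x) (rest.map (fun x => (keyOf x, x))) x []]
          have hfilter1 : (rest.map (fun x => (keyOf x, x))).filter (fun p => p.1 == keyOf x)
              = (rest.filter (fun y => keyOf y == keyOf x)).map (fun x => (keyOf x, x)) := by
            rw [List.filter_map]; rfl
          have hfilter2 : (rest.map (fun x => (keyOf x, x))).filter (fun p => !(p.1 == keyOf x))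
              = (rest.filter (fun y => !(keyOf y == keyOf x))).map (fun x => (keyOf x, x)) := by
            rw [List.filter_map]; rfl
          have hlen : (rest.filter (fun y => !(keyOf y == keyOf x))).length ≤ n := by
            have := List.length_filter_le (fun y => !(keyOf y == keyOf x)) rest
            simp only [List.length_cons] at hl
            omega
          rw [hfilter1, hfilter2]
          simp only [List.nil_append]
          rw [ih _ hlen]
          have hfold : (x :: rest).foldl gadd [] = rest.foldl gadd [(keyOf x, [x])] := by
            simp [List.foldl_cons, gadd]
          rw [hfold, foldl_gadd_split rest (keyOf x) [x] []]
          simp [mergeGroup, List.append_assoc, List.foldl_map]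

-- ===== VERDICT (by name: the statement is the Claim_ definition above) =====
theorem cut_list_spec : Claim_equal_cut_list := by
  intro new_array _
  unfold Spec_cut_list cut_list cut_list_alt
  have hA := foldl_A (new_array.map String.toList) [] ⟨List.nodup_nil, by simp⟩
  simp only [List.map_nil] at hA
  rw [hA, altGo_eq _ _ le_rfl]
  simp
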